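-- pv_equiv track=rewrite | github.com/fineman999/Algorithm | BaekJoon/Gold/Level4/star.py | bfs
-- ===== SOURCE A (Python) =====
-- from collections import deque
--
-- dx = [0,1,0,-1]
--
-- dy = [1,0,-1,0]
--
-- def bfs(N, M, graph):
--     visited = [[False]*M for _ in range(N)]
--     cnt_graph = [[0]*M for _ in range(N)]
--     q = deque()
--     q.append((0,0))
--     visited[0][0] = True
--     while q:
--         (x,y) = q.popleft()
--         for i in range(4):
--             nx = dx[i] + x
--             ny = dy[i] + y
--             if -1 < ny < N and -1 < nx < M:
--                 if not visited[ny][nx] and graph[ny][nx] == 0: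
--                     q.append((nx, ny))
--                     visited[ny][nx] = True
--                 if graph[ny][nx] == 1:
--                     cnt_graph[ny][nx] += 1
--     return cnt_graph
-- ===== SOURCE B (Python) =====
-- def bfs(N, M, graph):
--     # Phase 1: flood fill from (0,0); a growing order list with an index pointer replaces the deque.
--     visited = [[False] * M for _ in range(N)]
--     visited[0][0] = True
--     order = [(0, 0)]
--     i = 0
--     while i < len(order):
--         x, y = order[i]
--         i += 1
--         for nx, ny in ((x, y + 1), (x + 1, y), (x, y - 1), (x - 1, y)):
--             if -1 < ny < N and -1 < nx < M and not visited[ny][nx] and graph[ny][nx] == 0: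
--                 visited[ny][nx] = True
--                 order.append((nx, ny))
--     # Phase 2: a separate pass over the recorded order bumps every in-bounds wall neighbour.
--     cnt_graph = [[0] * M for _ in range(N)]
--     for x, y in order:
--         for nx, ny in ((x, y + 1), (x + 1, y), (x, y - 1), (x - 1, y)):
--             if -1 < ny < N and -1 < nx < M and graph[ny][nx] == 1:
--                 cnt_graph[ny][nx] += 1
--     return cnt_graph
-- ===== Notes on version B (the rewrite author's own statement) =====
-- stated objective: alternative
-- what changed: A interleaves wall-counting inside a single deque-based BFS loop using dx/dy offset arrays; B decomposes the work into two passes - a flood fill recording the visit order in a growing list walked by an index pointer (no deque, literal neighbour tuples, one combined guard), then a separate counting loop over that recorded order.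
import Mathlib
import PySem

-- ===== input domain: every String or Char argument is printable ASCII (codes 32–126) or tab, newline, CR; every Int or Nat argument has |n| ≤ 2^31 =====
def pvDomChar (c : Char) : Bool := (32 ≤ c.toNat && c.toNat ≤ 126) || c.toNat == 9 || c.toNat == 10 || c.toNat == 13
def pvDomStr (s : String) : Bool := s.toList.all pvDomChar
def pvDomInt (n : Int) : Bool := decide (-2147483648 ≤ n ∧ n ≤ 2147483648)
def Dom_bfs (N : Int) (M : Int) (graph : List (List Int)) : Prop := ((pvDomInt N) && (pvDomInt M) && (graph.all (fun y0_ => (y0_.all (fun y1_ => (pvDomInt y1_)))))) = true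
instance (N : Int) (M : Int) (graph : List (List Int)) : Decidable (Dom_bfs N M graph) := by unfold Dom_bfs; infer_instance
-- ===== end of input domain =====

-- B replaces A's single interleaved deque/Bool-grid BFS by two separate passes: a flood fill
-- with a visited SET and an index-pointer order list, then a counting pass over that order (alternative decomposition, same cost).

-- ===== PORT A =====
-- shared 2D-indexing helpers: both Pythons contain the identical expressions graph[ny][nx] and
-- cnt_graph[ny][nx] += 1; exact whenever the indices are in range (guaranteed by the guards plus Pre_bfs)
def pvGrid2 (g : List (List Int)) (ny nx : Int) : Int :=
  PySem.List.pyGetD (PySem.List.pyGetD g ny []) nx 0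

def pvBump (cnt : List (List Int)) (ny nx : Int) : List (List Int) :=
  PySem.List.pySetD cnt ny
    (PySem.List.pySetD (PySem.List.pyGetD cnt ny []) nx (pvGrid2 cnt ny nx + 1))

def pvDx : List Int := [0, 1, 0, -1]
def pvDy : List Int := [1, 0, -1, 0]

def pvVisGet (vis : List (List Bool)) (ny nx : Int) : Bool :=
  PySem.List.pyGetD (PySem.List.pyGetD vis ny []) nx false

def pvVisSet (vis : List (List Bool)) (ny nx : Int) : List (List Bool) :=
  PySem.List.pySetD vis ny
    (PySem.List.pySetD (PySem.List.pyGetD vis ny []) nx true)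

-- the body of A's 'for i in range(4)' over one popped cell (x, y); state ((q, visited), cnt_graph)
def pvStepA (N M : Int) (graph : List (List Int)) (x y : Int)
    (st : (List (Int × Int) × List (List Bool)) × List (List Int)) :
    (List (Int × Int) × List (List Bool)) × List (List Int) :=
  (PySem.List.pyRange 0 4 1).foldl (fun s i =>
    ((if (-1 < PySem.List.pyGetD pvDy i 0 + y ∧ PySem.List.pyGetD pvDy i 0 + y < N ∧
          -1 < PySem.List.pyGetD pvDx i 0 + x ∧ PySem.List.pyGetD pvDx i 0 + x < M) ∧
         pvVisGet s.1.2 (PySem.List.pyGetD pvDy i 0 + y) (PySem.List.pyGetD pvDx i 0 + x) = false ∧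
         pvGrid2 graph (PySem.List.pyGetD pvDy i 0 + y) (PySem.List.pyGetD pvDx i 0 + x) = 0 then
        (s.1.1 ++ [(PySem.List.pyGetD pvDx i 0 + x, PySem.List.pyGetD pvDy i 0 + y)],
         pvVisSet s.1.2 (PySem.List.pyGetD pvDy i 0 + y) (PySem.List.pyGetD pvDx i 0 + x))
      else s.1),
     (if (-1 < PySem.List.pyGetD pvDy i 0 + y ∧ PySem.List.pyGetD pvDy i 0 + y < N ∧
          -1 < PySem.List.pyGetD pvDx i 0 + x ∧ PySem.List.pyGetD pvDx i 0 + x < M) ∧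
         pvGrid2 graph (PySem.List.pyGetD pvDy i 0 + y) (PySem.List.pyGetD pvDx i 0 + x) = 1 then
        pvBump s.2 (PySem.List.pyGetD pvDy i 0 + y) (PySem.List.pyGetD pvDx i 0 + x)
      else s.2))) st

-- A's 'while q' loop (fuel bounds the number of pops; N*M+1 always suffices: each cell is enqueued at most once)
def pvLoopA (N M : Int) (graph : List (List Int)) :
    Nat → List (Int × Int) → List (List Bool) → List (List Int) → List (List Int)
  | 0, _, _, cnt => cnt
  | _ + 1, [], _, cnt => cnt
  | fuel + 1, (x, y) :: qs, vis, cnt =>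
      let st := pvStepA N M graph x y ((qs, vis), cnt)
      pvLoopA N M graph fuel st.1.1 st.1.2 st.2

def bfs (N : Int) (M : Int) (graph : List (List Int)) : List (List Int) :=
  let vis0 := List.replicate N.toNat (List.replicate M.toNat false)
  let cnt0 := List.replicate N.toNat (List.replicate M.toNat (0 : Int))
  pvLoopA N M graph (N.toNat * M.toNat + 1) [(0, 0)] (pvVisSet vis0 0 0) cnt0

-- ===== PORT B =====
def pvNbrs (x y : Int) : List (Int × Int) := [(x, y + 1), (x + 1, y), (x, y - 1), (x - 1, y)]

-- B phase 1 inner loop: try the four neighbours of (x, y); state (pending tail of order, visited)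
def pvStepB (N M : Int) (graph : List (List Int))
    (st : List (Int × Int) × List (List Bool)) (x y : Int) :
    List (Int × Int) × List (List Bool) :=
  (pvNbrs x y).foldl (fun s c =>
    if (-1 < c.2 ∧ c.2 < N ∧ -1 < c.1 ∧ c.1 < M) ∧
       pvVisGet s.2 c.2 c.1 = false ∧ pvGrid2 graph c.2 c.1 = 0 then
      (s.1 ++ [c], pvVisSet s.2 c.2 c.1)
    else s) st

-- B phase 1: 'while i < len(order)'; pending = order[i:], done = order[:i]; returns the order list
def pvLoopB (N M : Int) (graph : List (List Int)) :
    Nat → List (Int × Int) → List (List Bool) → List (Int × Int) → List (Int × Int)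
  | 0, _, _, done => done
  | _ + 1, [], _, done => done
  | fuel + 1, (x, y) :: pending, vis, done =>
      let st := pvStepB N M graph (pending, vis) x y
      pvLoopB N M graph fuel st.1 st.2 (done ++ [(x, y)])

-- B phase 2 body: bump every in-bounds wall neighbour of one recorded cell
def pvCount (N M : Int) (graph : List (List Int)) (cnt : List (List Int)) (c : Int × Int) :
    List (List Int) :=
  (pvNbrs c.1 c.2).foldl (fun cg d =>
    if (-1 < d.2 ∧ d.2 < N ∧ -1 < d.1 ∧ d.1 < M) ∧ pvGrid2 graph d.2 d.1 = 1 then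
      pvBump cg d.2 d.1
    else cg) cnt

def bfs_alt (N : Int) (M : Int) (graph : List (List Int)) : List (List Int) :=
  let vis0 := List.replicate N.toNat (List.replicate M.toNat false)
  let order := pvLoopB N M graph (N.toNat * M.toNat + 1) [(0, 0)] (pvVisSet vis0 0 0) []
  let cnt0 := List.replicate N.toNat (List.replicate M.toNat (0 : Int))
  order.foldl (pvCount N M graph) cnt0

-- ===== PRECONDITION & SPEC =====
-- Pre_bfs admits N, M ≥ 1 grids in which every cell the flood fill could ever index — the in-bounds
-- neighbours of (0, 0) and of every present in-bounds zero cell — is present in graph; outside it A can hit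
-- IndexError. This also excludes some ragged grids on which A happens to return only because the flood
-- fill never reaches the missing cell (B returns the same value there).
def pvAvail (graph : List (List Int)) (ny nx : Int) : Prop :=
  0 ≤ ny ∧ ny < (graph.length : Int) ∧ 0 ≤ nx ∧
    nx < ((PySem.List.pyGetD graph ny []).length : Int)

def pvSafeAt (N M : Int) (graph : List (List Int)) (x y : Int) : Prop :=
  ∀ p ∈ [(x, y + 1), (x + 1, y), (x, y - 1), (x - 1, y)],
    (-1 < p.2 ∧ p.2 < N ∧ -1 < p.1 ∧ p.1 < M) → pvAvail graph p.2 p.1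

def pvIsZero (N M : Int) (graph : List (List Int)) (x y : Int) : Prop :=
  (-1 < y ∧ y < N ∧ -1 < x ∧ x < M) ∧ pvAvail graph y x ∧
    PySem.List.pyGetD (PySem.List.pyGetD graph y []) x 0 = 0

def Pre_bfs (N : Int) (M : Int) (graph : List (List Int)) : Prop :=
  0 < N ∧ 0 < M ∧ pvSafeAt N M graph 0 0 ∧
    ∀ y ∈ List.range graph.length, ∀ x ∈ List.range (PySem.List.pyGetD graph (y : Int) []).length,
      pvIsZero N M graph (x : Int) (y : Int) →
      (∃ p ∈ [((x : Int), (y : Int) + 1), ((x : Int) + 1, (y : Int)), ((x : Int), (y : Int) - 1),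
              ((x : Int) - 1, (y : Int))], p = (0, 0) ∨ pvIsZero N M graph p.1 p.2) →
        pvSafeAt N M graph (x : Int) (y : Int)
instance (N : Int) (M : Int) (graph : List (List Int)) : Decidable (Pre_bfs N M graph) := by
  unfold Pre_bfs pvIsZero pvSafeAt pvAvail; infer_instance

def pvWitness_bfs : Int × Int × List (List Int) := (2, 2, [[0, 1], [1, 0]])

def Spec_bfs (N : Int) (M : Int) (graph : List (List Int)) (out : List (List Int)) : Prop := out = bfs_alt N M graph
instance (N : Int) (M : Int) (graph : List (List Int)) (out : List (List Int)) : Decidable (Spec_bfs N M graph out) := by unfold Spec_bfs; infer_instance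

-- ===== CLAIM (what is proved, stated in full; the proofs are below) =====
def Claim_equal_bfs : Prop := ∀ (N : Int) (M : Int) (graph : List (List Int)), Dom_bfs N M graph → Pre_bfs N M graph → Spec_bfs N M graph (bfs N M graph)

-- ===== LEMMAS AND PROOFS =====

-- one direction of A's inner loop, of B's flood step, of B's count step
def pvB1 (N M : Int) (graph : List (List Int)) (nx ny : Int)
    (st : List (Int × Int) × List (List Bool)) : List (Int × Int) × List (List Bool) :=
  if (-1 < ny ∧ ny < N ∧ -1 < nx ∧ nx < M) ∧
     pvVisGet st.2 ny nx = false ∧ pvGrid2 graph ny nx = 0 then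
    (st.1 ++ [(nx, ny)], pvVisSet st.2 ny nx)
  else st

def pvC1 (N M : Int) (graph : List (List Int)) (nx ny : Int) (cnt : List (List Int)) :
    List (List Int) :=
  if (-1 < ny ∧ ny < N ∧ -1 < nx ∧ nx < M) ∧ pvGrid2 graph ny nx = 1 then
    pvBump cnt ny nx
  else cnt

def pvA1 (N M : Int) (graph : List (List Int)) (nx ny : Int)
    (st : (List (Int × Int) × List (List Bool)) × List (List Int)) :
    (List (Int × Int) × List (List Bool)) × List (List Int) :=
  (pvB1 N M graph nx ny st.1, pvC1 N M graph nx ny st.2)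

lemma pvStepA_unfold (N M : Int) (graph : List (List Int)) (x y : Int) st :
    pvStepA N M graph x y st =
      pvA1 N M graph (-1 + x) (0 + y)
        (pvA1 N M graph (0 + x) (-1 + y)
          (pvA1 N M graph (1 + x) (0 + y)
            (pvA1 N M graph (0 + x) (1 + y) st))) := by
  unfold pvStepA pvA1 pvB1 pvC1
  rfl

lemma pvStepB_unfold (N M : Int) (graph : List (List Int)) (x y : Int) st :
    pvStepB N M graph st x y =
      pvB1 N M graph (x - 1) y
        (pvB1 N M graph x (y - 1)
          (pvB1 N M graph (x + 1) y
            (pvB1 N M graph x (y + 1) st))) := rfl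

lemma pvCount_unfold (N M : Int) (graph : List (List Int)) (cnt : List (List Int)) (c : Int × Int) :
    pvCount N M graph cnt c =
      pvC1 N M graph (c.1 - 1) c.2
        (pvC1 N M graph c.1 (c.2 - 1)
          (pvC1 N M graph (c.1 + 1) c.2
            (pvC1 N M graph c.1 (c.2 + 1) cnt))) := rfl

-- A's processing of one popped cell is B's flood step paired with B's count step
lemma pvStep_sim (N M : Int) (graph : List (List Int)) (x y : Int)
    (qv : List (Int × Int) × List (List Bool)) (cnt : List (List Int)) :
    pvStepA N M graph x y (qv, cnt) = (pvStepB N M graph qv x y, pvCount N M graph cnt (x, y)) := by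
  rw [pvStepA_unfold, pvStepB_unfold, pvCount_unfold,
      show (-1 : Int) + x = x - 1 from by ring,
      show (-1 : Int) + y = y - 1 from by ring,
      show (0 : Int) + x = x from by ring,
      show (0 : Int) + y = y from by ring,
      show (1 : Int) + x = x + 1 from by ring,
      show (1 : Int) + y = y + 1 from by ring]
  rfl

lemma pvLoopB_acc (N M : Int) (graph : List (List Int)) :
    ∀ fuel q vis done, pvLoopB N M graph fuel q vis done = done ++ pvLoopB N M graph fuel q vis [] := by
  intro fuel
  induction fuel with
  | zero => intro q vis done; simp [pvLoopB]
  | succ f ih =>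
      intro q vis done
      match q with
      | [] => simp [pvLoopB]
      | (x, y) :: qs =>
          show pvLoopB N M graph f _ _ (done ++ [(x, y)]) = done ++ pvLoopB N M graph f _ _ ([] ++ [(x, y)])
          rw [ih _ _ (done ++ [(x, y)]), ih _ _ ([] ++ [(x, y)])]
          simp

-- A's interleaved loop equals B's flood-fill loop followed by the counting pass
lemma pvMain_sim (N M : Int) (graph : List (List Int)) :
    ∀ fuel (q : List (Int × Int)) vis cnt,
      pvLoopA N M graph fuel q vis cnt =
        (pvLoopB N M graph fuel q vis []).foldl (pvCount N M graph) cnt := by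
  intro fuel
  induction fuel with
  | zero => intro q vis cnt; simp [pvLoopA, pvLoopB]
  | succ f ih =>
      intro q vis cnt
      match q with
      | [] => simp [pvLoopA, pvLoopB]
      | (x, y) :: qs =>
          show pvLoopA N M graph f _ _ _ =
            (pvLoopB N M graph f _ _ ([] ++ [(x, y)])).foldl (pvCount N M graph) cnt
          rw [pvLoopB_acc, List.nil_append, List.singleton_append, List.foldl_cons,
              pvStep_sim N M graph x y (qs, vis) cnt]
          exact ih _ _ _

-- ===== VERDICT (by name: the statement is the Claim_ definition above) =====
theorem bfs_spec : Claim_equal_bfs := by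
  intro N M graph _hdom _hpre
  unfold Spec_bfs bfs bfs_alt
  exact pvMain_sim N M graph _ _ _ _
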